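-- pv_equiv track=rewrite | github.com/bluhmskidmore-tech/arvinfinanceanalyse | backend/app/governance/formal_compute_lineage.py | _normalized_non_empty_values
-- ===== SOURCE A (Python) =====
-- def _normalized_non_empty_values(values: list[str] | tuple[str, ...]) -> list[str]:
--     return sorted(
--         {
--             str(value or "").strip()
--             for value in values
--             if str(value or "").strip()
--         }
--     )
-- ===== SOURCE B (Python) =====
-- def _normalized_non_empty_values(values):
--     normalized = []
--     for value in values:
--         s = str(value or "").strip()
--         if s:
--             normalized.append(s)
--     normalized.sort()
--     out = []
--     for s in normalized:
--         if not out or out[-1] != s: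
--             out.append(s)
--     return out
-- ===== Notes on version B (the rewrite author's own statement) =====
-- stated objective: alternative
-- what changed: Replaces the set-comprehension dedup followed by sorted() with a single filtered list that is sorted in place and then deduplicated by one adjacent-comparison scan.
import Mathlib
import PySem

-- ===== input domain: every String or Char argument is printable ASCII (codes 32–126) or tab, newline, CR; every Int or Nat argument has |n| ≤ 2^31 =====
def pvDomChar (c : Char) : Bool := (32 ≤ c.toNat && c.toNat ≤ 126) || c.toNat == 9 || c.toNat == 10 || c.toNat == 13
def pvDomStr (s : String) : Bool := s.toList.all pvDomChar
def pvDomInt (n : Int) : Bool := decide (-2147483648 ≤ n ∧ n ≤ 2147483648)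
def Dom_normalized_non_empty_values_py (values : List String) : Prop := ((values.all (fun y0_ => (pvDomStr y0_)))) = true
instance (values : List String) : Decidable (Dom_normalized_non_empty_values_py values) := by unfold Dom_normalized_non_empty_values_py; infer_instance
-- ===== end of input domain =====

-- B replaces A's set-comprehension dedup + sorted() by filter, in-place sort, then one adjacent-duplicate scan (alternative decomposition, same cost).

-- the shared normalization subexpression: str(value or "").strip()  (value is a str, so `value or ""` is `if value = "" then "" else value`)
def pvNorm (value : String) : String := PySem.Str.strip (if value = "" then "" else value)

-- ===== PORT A =====
-- sorted({str(value or "").strip() for value in values if str(value or "").strip()})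
def normalized_non_empty_values_py (values : List String) : List String :=
  PySem.List.sorted
    (values.foldl (fun st value =>
      if pvNorm value ≠ "" then PySem.Set.add st (pvNorm value) else st)
      PySem.Set.empty)
    (fun x => x) false

-- ===== PORT B =====
def normalized_non_empty_values_py_alt (values : List String) : List String :=
  let normalized := values.foldl (fun acc value =>
    if pvNorm value ≠ "" then acc ++ [pvNorm value] else acc) []
  let sortedL := PySem.List.sorted normalized (fun x => x) false
  sortedL.foldl (fun out s =>
    if out = [] ∨ out.getLast? ≠ some s then out ++ [s] else out) []

-- ===== PRECONDITION & SPEC =====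
def Spec_normalized_non_empty_values_py (values : List String) (out : List String) : Prop := out = normalized_non_empty_values_py_alt values
instance (values : List String) (out : List String) : Decidable (Spec_normalized_non_empty_values_py values out) := by unfold Spec_normalized_non_empty_values_py; infer_instance

-- ===== CLAIM (what is proved, stated in full; the proofs are below) =====
def Claim_equal_normalized_non_empty_values_py : Prop := ∀ (values : List String), Dom_normalized_non_empty_values_py values → Spec_normalized_non_empty_values_py values (normalized_non_empty_values_py values)

-- ===== LEMMAS AND PROOFS =====

-- adjacent-dedup recursion used only to reason about B's final foldl
def pvRec : Option String → List String → List String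
  | _, [] => []
  | last, x :: t => if last = some x then pvRec last t else x :: pvRec (some x) t

-- B's list-building fold shifts its accumulator out front
theorem pv_bfold_shift (vs : List String) : ∀ (acc : List String),
    vs.foldl (fun acc value =>
      if pvNorm value ≠ "" then acc ++ [pvNorm value] else acc) acc
    = acc ++ vs.foldl (fun acc value =>
      if pvNorm value ≠ "" then acc ++ [pvNorm value] else acc) [] := by
  induction vs with
  | nil => intro acc; simp
  | cons v t ih =>
    intro acc
    by_cases h : pvNorm v ≠ ""
    · rw [List.foldl_cons, List.foldl_cons, if_pos h, if_pos h,
        ih (acc ++ [pvNorm v]), ih ([] ++ [pvNorm v])]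
      simp
    · rw [List.foldl_cons, List.foldl_cons, if_neg h, if_neg h]
      exact ih acc

-- A's set fold is the fold of Set.add over B's filtered list
theorem pv_setfold_eq (vs : List String) : ∀ (st : PySem.Set String),
    vs.foldl (fun st value =>
      if pvNorm value ≠ "" then PySem.Set.add st (pvNorm value) else st) st
    = (vs.foldl (fun acc value =>
        if pvNorm value ≠ "" then acc ++ [pvNorm value] else acc) []).foldl PySem.Set.add st := by
  induction vs with
  | nil => intro st; rfl
  | cons v t ih =>
    intro st
    by_cases h : pvNorm v ≠ ""
    · rw [List.foldl_cons, List.foldl_cons, if_pos h, if_pos h,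
        ih (PySem.Set.add st (pvNorm v)), pv_bfold_shift t ([] ++ [pvNorm v])]
      simp
    · rw [List.foldl_cons, List.foldl_cons, if_neg h, if_neg h]
      exact ih st

-- B's dedup foldl is pvRec of the last appended element
theorem pv_dfold_shift (xs : List String) : ∀ (out : List String),
    xs.foldl (fun out s =>
      if out = [] ∨ out.getLast? ≠ some s then out ++ [s] else out) out
    = out ++ pvRec out.getLast? xs := by
  induction xs with
  | nil => intro out; simp [pvRec]
  | cons x t ih =>
    intro out
    by_cases h : out.getLast? = some x
    · have hne : ¬ (out = [] ∨ out.getLast? ≠ some x) := by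
        rintro (rfl | hne)
        · simp at h
        · exact hne h
      rw [List.foldl_cons, if_neg hne, ih out, h]
      simp [pvRec]
    · rw [List.foldl_cons, if_pos (Or.inr h), ih (out ++ [x])]
      simp [pvRec, h, List.getLast?_append]

-- pvRec on a ≤-sorted list whose elements dominate `last`: strictly increasing, membership drops only `last`
theorem pv_rec_spec (xs : List String) : ∀ (p? : Option String),
    xs.Pairwise (· ≤ ·) → (∀ y ∈ xs, ∀ p : String, p? = some p → p ≤ y) →
    (pvRec p? xs).Pairwise (· < ·) ∧ ∀ a, (a ∈ pvRec p? xs ↔ a ∈ xs ∧ p? ≠ some a) := by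
  induction xs with
  | nil => intro p? _ _; simp [pvRec]
  | cons x t ih =>
    intro p? hpw hdom
    have hx : ∀ y ∈ t, x ≤ y := fun y hy => (List.pairwise_cons.mp hpw).1 y hy
    have hpt : t.Pairwise (· ≤ ·) := (List.pairwise_cons.mp hpw).2
    have ihx := ih (some x) hpt (fun y hy p hp => by
      injection hp with h'; exact h' ▸ hx y hy)
    obtain ⟨h1, h2⟩ := ihx
    by_cases h : p? = some x
    · subst h
      have hred : pvRec (some x) (x :: t) = pvRec (some x) t := by simp [pvRec]
      refine ⟨hred ▸ h1, fun a => ?_⟩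
      rw [hred, h2 a, List.mem_cons]
      constructor
      · rintro ⟨hat, hne⟩
        exact ⟨Or.inr hat, hne⟩
      · rintro ⟨ha, hne⟩
        rcases ha with rfl | hat
        · exact absurd rfl hne
        · exact ⟨hat, hne⟩
    · have hred : pvRec p? (x :: t) = x :: pvRec (some x) t := by simp [pvRec, h]
      have hmemlt : ∀ b ∈ pvRec (some x) t, x < b := by
        intro b hb
        obtain ⟨hbt, hbx⟩ := (h2 b).mp hb
        have hne : x ≠ b := fun hxb => hbx (by rw [hxb])
        exact lt_of_le_of_ne (hx b hbt) hne
      refine ⟨hred ▸ List.pairwise_cons.mpr ⟨hmemlt, h1⟩, fun a => ?_⟩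
      rw [hred, List.mem_cons, h2 a, List.mem_cons]
      constructor
      · rintro (rfl | ⟨hat, hax⟩)
        · exact ⟨Or.inl rfl, fun hpa => h hpa⟩
        · refine ⟨Or.inr hat, fun hpa => ?_⟩
          have hpx : a ≤ x := hdom x (List.mem_cons.mpr (Or.inl rfl)) a hpa
          have hax' : a ≠ x := fun hsx => hax (by rw [hsx])
          exact hax' (le_antisymm hpx (hx a hat))
      · rintro ⟨ha, hpa⟩
        rcases ha with rfl | hat
        · exact Or.inl rfl
        · by_cases hax : a = x
          · exact Or.inl hax
          · exact Or.inr ⟨hat, fun hsx => hax (Option.some.inj hsx).symm⟩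

-- ===== VERDICT (by name: the statement is the Claim_ definition above) =====
theorem normalized_non_empty_values_py_spec : Claim_equal_normalized_non_empty_values_py := by
  intro values _
  unfold Spec_normalized_non_empty_values_py normalized_non_empty_values_py normalized_non_empty_values_py_alt
  simp only []
  set L := values.foldl (fun acc value =>
      if pvNorm value ≠ "" then acc ++ [pvNorm value] else acc) [] with hL
  have hA : values.foldl (fun st value =>
      if pvNorm value ≠ "" then PySem.Set.add st (pvNorm value) else st)
      PySem.Set.empty = PySem.Set.ofList L := by
    rw [PySem.Set.ofList_eq_foldl L]
    exact pv_setfold_eq values []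
  rw [hA]
  set S := PySem.List.sorted L (fun x => x) false with hS
  have hB : S.foldl (fun out s =>
      if out = [] ∨ out.getLast? ≠ some s then out ++ [s] else out) []
      = pvRec none S := by
    simpa using pv_dfold_shift S []
  rw [hB]
  have hpw : S.Pairwise (· ≤ ·) := by
    simpa using PySem.List.sorted_pairwise L (fun x => x)
  obtain ⟨hlt, hmem⟩ := pv_rec_spec S none hpw (by simp)
  have hperm : (pvRec none S).Perm (PySem.Set.ofList L) := by
    rw [List.perm_ext_iff_of_nodup (hlt.imp ne_of_lt) (PySem.Set.nodup_ofList L)]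
    intro a
    rw [hmem a, PySem.Set.mem_ofList]
    simp [hS, PySem.List.mem_sorted]
  exact PySem.List.sorted_eq_of_perm_of_pairwise_lt _ _ _ hperm hlt
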